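-- pv_equiv track=rewrite | github.com/vanmjnh/CTF | 2025_PwnMe/decode_runner.py | decode_chuck_norris_unary
-- ===== SOURCE A (Python) =====
-- def decode_chuck_norris_unary(cipher_text):
--     # Chia văn bản thành các khối mã unary
--     blocks = cipher_text.split()
--     binary_string = ''
--
--     for i in range(0, len(blocks), 2):
--         bit_value = '0' if blocks[i] == '00' else '1'
--         binary_string += bit_value * len(blocks[i + 1])
--
--     # Chia chuỗi nhị phân thành các đoạn 7 bit
--     characters = [binary_string[j:j+7] for j in range(0, len(binary_string), 7)]
--
--     # Chuyển đổi từng đoạn nhị phân thành ký tự ASCII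
--     decoded_text = ''.join(chr(int(char, 2)) for char in characters if char)
--
--     return decoded_text
-- ===== SOURCE B (Python) =====
-- def decode_chuck_norris_unary(cipher_text):
--     # Single streaming pass with a numeric bit accumulator instead of
--     # building the full binary string and slicing it into 7-bit chunks.
--     blocks = cipher_text.split()
--     out = []
--     val = 0
--     nbits = 0
--     for i in range(0, len(blocks), 2):
--         bit = 0 if blocks[i] == '00' else 1
--         for _ in range(len(blocks[i + 1])):
--             val = val * 2 + bit
--             nbits += 1
--             if nbits == 7:
--                 out.append(chr(val))
--                 val = 0
--                 nbits = 0
--     if nbits: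
--         out.append(chr(val))
--     return ''.join(out)
-- ===== Notes on version B (the rewrite author's own statement) =====
-- stated objective: alternative
-- what changed: Replaced A's two-phase design (concatenate the full binary string, then slice it into 7-bit groups and int(...,2) each) with a single streaming pass that keeps a numeric accumulator and bit counter, emitting a character whenever 7 bits have been consumed and flushing the trailing partial group.
-- outside the precondition, e.g. on decode_chuck_norris_unary('0 00 0'): A raises IndexError, B raises IndexError
import Mathlib
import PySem

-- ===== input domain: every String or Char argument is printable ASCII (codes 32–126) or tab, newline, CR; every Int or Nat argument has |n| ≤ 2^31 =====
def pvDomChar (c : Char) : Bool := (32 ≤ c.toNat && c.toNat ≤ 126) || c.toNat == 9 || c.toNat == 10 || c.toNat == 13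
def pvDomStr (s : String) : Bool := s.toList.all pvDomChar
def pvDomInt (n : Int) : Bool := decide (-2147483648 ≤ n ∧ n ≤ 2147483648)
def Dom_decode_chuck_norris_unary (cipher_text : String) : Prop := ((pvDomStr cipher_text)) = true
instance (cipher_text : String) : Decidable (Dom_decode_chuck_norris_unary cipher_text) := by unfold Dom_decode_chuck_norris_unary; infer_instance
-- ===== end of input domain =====

-- B replaces A's two-phase "build the full binary string, then slice it into 7-bit chunks"
-- by a single streaming pass with a numeric bit accumulator (objective: alternative decomposition).

-- ===== PORT A =====
-- hand port of int(s, 2): exact on nonempty strings over '0'/'1', the only chunks A applies it to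
def pvBin2 (cs : List Char) : Nat := cs.foldl (fun a c => a * 2 + (if c = '1' then 1 else 0)) 0

def decode_chuck_norris_unary (cipher_text : String) : String :=
  let blocks := PySem.Str.split₀ cipher_text
  let binary : List Char :=
    (PySem.List.pyRange 0 (blocks.length : Int) 2).foldl
      (fun acc i =>
        let bit : Char := if PySem.List.pyGetD blocks i "" = "00" then '0' else '1'
        acc ++ List.replicate (PySem.Str.len (PySem.List.pyGetD blocks (i + 1) "")).toNat bit)
      []
  let characters : List (List Char) :=
    (PySem.List.pyRange 0 (binary.length : Int) 7).map
      (fun j => PySem.List.slice binary (some j) (some (j + 7)))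
  -- ''.join(chr(int(c, 2)) for c in characters if c): every piece is one character,
  -- so the join is String.mk of the list of characters
  String.mk ((characters.filter (fun c => !c.isEmpty)).map (fun c => Char.ofNat (pvBin2 c)))

-- ===== PORT B =====
def decode_chuck_norris_unary_alt (cipher_text : String) : String :=
  let blocks := PySem.Str.split₀ cipher_text
  let st :=
    (PySem.List.pyRange 0 (blocks.length : Int) 2).foldl
      (fun (st : List Char × Nat × Nat) i =>
        let bit : Nat := if PySem.List.pyGetD blocks i "" = "00" then 0 else 1
        (List.range (PySem.Str.len (PySem.List.pyGetD blocks (i + 1) "")).toNat).foldl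
          (fun st _ =>
            let val := st.2.1 * 2 + bit
            let nbits := st.2.2 + 1
            if nbits = 7 then (st.1 ++ [Char.ofNat val], 0, 0) else (st.1, val, nbits))
          st)
      (([] : List Char), 0, 0)
  String.mk (if st.2.2 ≠ 0 then st.1 ++ [Char.ofNat st.2.1] else st.1)

-- ===== PRECONDITION & SPEC =====
-- Pre_ excludes exactly the inputs whose whitespace split has an odd number of blocks:
-- there Python A raises IndexError at blocks[i + 1].
def Pre_decode_chuck_norris_unary (cipher_text : String) : Prop :=
  (PySem.Str.split₀ cipher_text).length % 2 = 0
instance (cipher_text : String) : Decidable (Pre_decode_chuck_norris_unary cipher_text) := by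
  unfold Pre_decode_chuck_norris_unary; infer_instance

def pvWitness_decode_chuck_norris_unary : String := "0 0000000"

def Spec_decode_chuck_norris_unary (cipher_text : String) (out : String) : Prop :=
  out = decode_chuck_norris_unary_alt cipher_text
instance (cipher_text : String) (out : String) : Decidable (Spec_decode_chuck_norris_unary cipher_text out) := by
  unfold Spec_decode_chuck_norris_unary; infer_instance

-- ===== CLAIM (what is proved, stated in full; the proofs are below) =====
def Claim_equal_decode_chuck_norris_unary : Prop := ∀ (cipher_text : String), Dom_decode_chuck_norris_unary cipher_text → Pre_decode_chuck_norris_unary cipher_text → Spec_decode_chuck_norris_unary cipher_text (decode_chuck_norris_unary cipher_text)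

-- ===== LEMMAS AND PROOFS =====

-- the whitespace blocks grouped into (marker, run) pairs
def pvPairs : List String → List (String × String)
  | m :: r :: t => (m, r) :: pvPairs t
  | _ => []

-- the full binary string, as a flatMap over the pairs
def pvBits (ps : List (String × String)) : List Char :=
  ps.flatMap (fun p => List.replicate (PySem.Str.len p.2).toNat (if p.1 = "00" then '0' else '1'))

-- B's streaming step, one bit at a time
def pvStep (st : List Char × Nat × Nat) (c : Char) : List Char × Nat × Nat :=
  let val := st.2.1 * 2 + (if c = '1' then 1 else 0)
  let nbits := st.2.2 + 1
  if nbits = 7 then (st.1 ++ [Char.ofNat val], 0, 0) else (st.1, val, nbits)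

def pvFinal (st : List Char × Nat × Nat) : List Char :=
  if st.2.2 ≠ 0 then st.1 ++ [Char.ofNat st.2.1] else st.1

-- the 7-bit chunks, peeled from the front
def pvChunks7 (l : List Char) : List (List Char) :=
  if h : l = [] then [] else l.take 7 :: pvChunks7 (l.drop 7)
termination_by l.length
decreasing_by
  cases l with
  | nil => exact absurd rfl h
  | cons a t => simp

-- fold over range(0, len(blocks), 2) indexing blocks[i], blocks[i+1]  =  fold over the pair list
theorem pv_fold_range {α : Type} (f : α → String → String → α) :
    ∀ (k : Nat) (blocks : List String) (init : α), blocks.length = 2 * k →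
      (List.range k).foldl (fun a j => f a (blocks.getD (2 * j) "") (blocks.getD (2 * j + 1) "")) init
        = (pvPairs blocks).foldl (fun a p => f a p.1 p.2) init := by
  intro k
  induction k with
  | zero =>
    intro blocks init h
    rw [List.length_eq_zero_iff] at h
    subst h
    simp [pvPairs]
  | succ k ih =>
    intro blocks init h
    match blocks with
    | [] => simp at h
    | [m] => simp at h; omega
    | m :: r :: t =>
      have ht : t.length = 2 * k := by simp at h; omega
      rw [List.range_succ_eq_map, List.foldl_cons, List.foldl_map]
      have hfun : (fun (a : α) (j : Nat) =>
            f a ((m :: r :: t).getD (2 * Nat.succ j) "") ((m :: r :: t).getD (2 * Nat.succ j + 1) ""))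
          = (fun (a : α) (j : Nat) => f a (t.getD (2 * j) "") (t.getD (2 * j + 1) "")) := by
        funext a j
        have h1 : 2 * Nat.succ j = (2 * j + 1) + 1 := by omega
        have h2 : 2 * Nat.succ j + 1 = ((2 * j + 1) + 1) + 1 := by omega
        rw [h2, h1, List.getD_cons_succ, List.getD_cons_succ, List.getD_cons_succ, List.getD_cons_succ]
      rw [hfun]
      show (List.range k).foldl _ (f init m r) = _
      rw [ih t (f init m r) ht]
      rfl

-- the pyRange(0, len, 2) fold of both ports, as a fold over the pair list
theorem pv_pyrange_pairs {α : Type} (f : α → String → String → α)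
    (k : Nat) (blocks : List String) (init : α) (h : blocks.length = 2 * k) :
    (PySem.List.pyRange 0 (blocks.length : Int) 2).foldl
        (fun a i => f a (PySem.List.pyGetD blocks i "") (PySem.List.pyGetD blocks (i + 1) "")) init
      = (pvPairs blocks).foldl (fun a p => f a p.1 p.2) init := by
  rw [PySem.List.pyRange_of_pos 0 (blocks.length : Int) (by norm_num), List.foldl_map]
  have hc : (if (0 : Int) < (blocks.length : Int) then (((blocks.length : Int) - 0 + 2 - 1) / 2).toNat else 0) = k := by
    split <;> omega
  rw [hc]
  have hfun : (fun (a : α) (j : Nat) =>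
        f a (PySem.List.pyGetD blocks (0 + 2 * (j : Int)) "") (PySem.List.pyGetD blocks (0 + 2 * (j : Int) + 1) ""))
      = (fun (a : α) (j : Nat) => f a (blocks.getD (2 * j) "") (blocks.getD (2 * j + 1) "")) := by
    funext a j
    have e1 : (0 : Int) + 2 * (j : Int) = ((2 * j : Nat) : Int) := by push_cast; ring
    have e2 : (0 : Int) + 2 * (j : Int) + 1 = ((2 * j + 1 : Nat) : Int) := by push_cast; ring
    rw [e2, e1, PySem.List.pyGetD_natCast, PySem.List.pyGetD_natCast]
  rw [hfun]
  exact pv_fold_range f k blocks init h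

-- fold of pvStep over a flatMap
theorem pv_foldl_flatMap {α : Type} (g : α → List Char) (step : List Char × Nat × Nat → Char → List Char × Nat × Nat) :
    ∀ (ps : List α) (init : List Char × Nat × Nat),
      ps.foldl (fun st p => (g p).foldl step st) init = (ps.flatMap g).foldl step init := by
  intro ps
  induction ps with
  | nil => intro init; simp
  | cons p t ih => intro init; simp [List.flatMap_cons, List.foldl_append, ih]

-- B's inner counted loop with a constant bit = the pvStep fold over the replicated bit characters
theorem pv_inner_range (c : Char) :
    ∀ (n : Nat) (st : List Char × Nat × Nat),
      (List.range n).foldl (fun s _ => pvStep s c) st = (List.replicate n c).foldl pvStep st := by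
  intro n
  induction n with
  | zero => intro st; simp
  | succ n ih =>
    intro st
    rw [List.replicate_succ, List.foldl_cons, List.range_succ_eq_map, List.foldl_cons, List.foldl_map, ih]

-- a short tail never reaches 7 bits: the fold only accumulates
theorem pv_small : ∀ (L : List Char) (out : List Char) (v n : Nat), n < 7 → L.length + n < 7 →
    L.foldl pvStep (out, v, n)
      = (out, L.foldl (fun a c => a * 2 + (if c = '1' then 1 else 0)) v, n + L.length) := by
  intro L
  induction L with
  | nil => intro out v n _ _; simp
  | cons c t ih =>
    intro out v n _ hlen
    have hne : ¬ (n + 1 = 7) := by simp at hlen ⊢; omega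
    rw [List.foldl_cons, show pvStep (out, v, n) c = (out, v * 2 + (if c = '1' then 1 else 0), n + 1) by
      simp [pvStep, hne]]
    rw [ih out _ (n + 1) (by omega) (by simp at hlen ⊢; omega)]
    simp
    omega

-- a full 7-bit chunk emits exactly one character and resets the accumulator
theorem pv_full7 (L : List Char) (out : List Char) (h : L.length = 7) :
    L.foldl pvStep (out, 0, 0) = (out ++ [Char.ofNat (pvBin2 L)], 0, 0) := by
  match L, h with
  | [a, b, c, d, e, f, g], _ =>
    simp [pvStep, pvBin2]

-- the streaming pass computes exactly the chunked decoding
theorem pv_stream_chunks (L : List Char) : ∀ (out : List Char),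
    pvFinal (L.foldl pvStep (out, 0, 0)) = out ++ (pvChunks7 L).map (fun c => Char.ofNat (pvBin2 c)) := by
  intro out
  by_cases h : L = []
  · subst h; simp [pvFinal, pvChunks7]
  · by_cases h7 : L.length < 7
    · rw [pv_small L out 0 0 (by omega) (by omega)]
      rw [pvChunks7]
      simp only [h, dite_eq_ite, if_false]
      have hd : L.drop 7 = [] := by
        rw [List.drop_eq_nil_iff]; omega
      have ht : L.take 7 = L := List.take_of_length_le (by omega)
      rw [hd, ht, pvChunks7]
      have hn : L.length ≠ 0 := by
        intro hc; exact h (List.length_eq_zero_iff.mp hc)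
      simp [pvFinal, hn, pvBin2]
    · have hsplit : L = L.take 7 ++ L.drop 7 := (List.take_append_drop 7 L).symm
      have h7' : (L.take 7).length = 7 := by simp; omega
      conv_lhs => rw [hsplit]
      rw [List.foldl_append, pv_full7 (L.take 7) out h7',
        pv_stream_chunks (L.drop 7) (out ++ [Char.ofNat (pvBin2 (L.take 7))])]
      conv_rhs => rw [pvChunks7]
      simp only [h, dite_eq_ite, if_false, List.map_cons]
      simp [List.append_assoc]
termination_by L.length
decreasing_by
  cases L with
  | nil => exact absurd rfl h
  | cons a t => simp

-- A's slice comprehension computes the front-peeled chunks (Nat-index form)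
theorem pv_chunks_nat : ∀ (m : Nat) (L : List Char), L.length ≤ 7 * m → 7 * m < L.length + 7 →
    (List.range m).map (fun k => List.take 7 (List.drop (7 * k) L)) = pvChunks7 L := by
  intro m
  induction m with
  | zero =>
    intro L h1 _
    have : L = [] := List.length_eq_zero_iff.mp (by omega)
    subst this
    simp [pvChunks7]
  | succ m ih =>
    intro L h1 h2
    have hne : L ≠ [] := by
      intro hc; subst hc; simp at h2
    rw [List.range_succ_eq_map, List.map_cons, List.map_map]
    rw [pvChunks7]
    simp only [hne, dite_eq_ite, if_false]
    have hfun : ((fun k => List.take 7 (List.drop (7 * k) L)) ∘ Nat.succ)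
        = (fun k => List.take 7 (List.drop (7 * k) (L.drop 7))) := by
      funext k
      have hXY : ∀ X Y : Nat, X = Y → List.take 7 (List.drop X L) = List.take 7 (List.drop Y L) := by
        intro X Y h; rw [h]
      simp only [Function.comp_apply, List.drop_drop]
      apply hXY
      omega
    have d1 : (L.drop 7).length ≤ 7 * m := by simp; omega
    have d2 : 7 * m < (L.drop 7).length + 7 := by simp; omega
    rw [hfun, ih (L.drop 7) d1 d2]
    simp

-- the pyRange(0, len, 7) slice comprehension = pvChunks7
theorem pv_chunksA (L : List Char) :
    (PySem.List.pyRange 0 (L.length : Int) 7).map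
        (fun j => PySem.List.slice L (some j) (some (j + 7)))
      = pvChunks7 L := by
  rw [PySem.List.pyRange_of_pos 0 (L.length : Int) (by norm_num), List.map_map]
  set m := (if (0 : Int) < (L.length : Int) then (((L.length : Int) - 0 + 7 - 1) / 7).toNat else 0) with hm
  have hfun : ((fun j => PySem.List.slice L (some j) (some (j + 7))) ∘ fun k : Nat => 0 + 7 * (k : Int))
      = (fun k : Nat => List.take 7 (List.drop (7 * k) L)) := by
    funext k
    have e1 : (0 : Int) + 7 * (k : Int) = ((7 * k : Nat) : Int) := by push_cast; ring
    have e2 : (0 : Int) + 7 * (k : Int) + 7 = ((7 * k : Nat) : Int) + ((7 : Nat) : Int) := by push_cast; ring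
    simp only [Function.comp_apply]
    rw [e2, e1]
    exact PySem.List.slice_natCast_add L (7 * k) 7
  rw [hfun]
  apply pv_chunks_nat
  · rw [hm]; split <;> omega
  · rw [hm]; split <;> omega

-- every chunk is nonempty, so A's truthiness filter keeps them all
theorem pv_chunks_ne_nil (L : List Char) : ∀ c ∈ pvChunks7 L, c ≠ [] := by
  intro c hc
  rw [pvChunks7] at hc
  by_cases h : L = []
  · simp [h] at hc
  · simp only [h, dite_eq_ite, if_false, List.mem_cons] at hc
    rcases hc with hc | hc
    · subst hc
      simp [List.take_eq_nil_iff, h]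
    · exact pv_chunks_ne_nil (L.drop 7) c hc
termination_by L.length
decreasing_by
  cases L with
  | nil => exact absurd rfl h
  | cons a t => simp

-- ===== VERDICT (by name: the statement is the Claim_ definition above) =====
theorem decode_chuck_norris_unary_spec : Claim_equal_decode_chuck_norris_unary := by
  intro s _ hpre
  unfold Pre_decode_chuck_norris_unary at hpre
  obtain ⟨k, hk⟩ : ∃ k, (PySem.Str.split₀ s).length = 2 * k :=
    ⟨(PySem.Str.split₀ s).length / 2, by omega⟩
  unfold Spec_decode_chuck_norris_unary decode_chuck_norris_unary decode_chuck_norris_unary_alt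
  simp only []
  set blocks := PySem.Str.split₀ s with hb
  -- A's binary string is pvBits of the pair list
  have hA : (PySem.List.pyRange 0 (blocks.length : Int) 2).foldl
      (fun acc i =>
        acc ++ List.replicate (PySem.Str.len (PySem.List.pyGetD blocks (i + 1) "")).toNat
          (if PySem.List.pyGetD blocks i "" = "00" then '0' else '1'))
      ([] : List Char) = pvBits (pvPairs blocks) := by
    rw [pv_pyrange_pairs
      (fun acc m r => acc ++ List.replicate (PySem.Str.len r).toNat (if m = "00" then '0' else '1'))
      k blocks [] hk]
    rw [PySem.List.foldl_append_eq_flatMap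
      (fun p : String × String => List.replicate (PySem.Str.len p.2).toNat (if p.1 = "00" then '0' else '1'))]
    rfl
  -- B's nested loops are the pvStep fold over the same bits
  have hB : (PySem.List.pyRange 0 (blocks.length : Int) 2).foldl
      (fun (st : List Char × Nat × Nat) i =>
        (List.range (PySem.Str.len (PySem.List.pyGetD blocks (i + 1) "")).toNat).foldl
          (fun st _ =>
            if st.2.2 + 1 = 7
            then (st.1 ++ [Char.ofNat (st.2.1 * 2 + (if PySem.List.pyGetD blocks i "" = "00" then 0 else 1))], 0, 0)
            else (st.1, st.2.1 * 2 + (if PySem.List.pyGetD blocks i "" = "00" then 0 else 1), st.2.2 + 1))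
          st)
      (([] : List Char), 0, 0) = (pvBits (pvPairs blocks)).foldl pvStep ([], 0, 0) := by
    rw [pv_pyrange_pairs
      (fun (st : List Char × Nat × Nat) m r =>
        (List.range (PySem.Str.len r).toNat).foldl
          (fun st _ =>
            if st.2.2 + 1 = 7
            then (st.1 ++ [Char.ofNat (st.2.1 * 2 + (if m = "00" then 0 else 1))], 0, 0)
            else (st.1, st.2.1 * 2 + (if m = "00" then 0 else 1), st.2.2 + 1))
          st)
      k blocks ([], 0, 0) hk]
    unfold pvBits
    rw [← pv_foldl_flatMap
      (fun p : String × String => List.replicate (PySem.Str.len p.2).toNat (if p.1 = "00" then '0' else '1'))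
      pvStep]
    congr 1
    funext st p
    by_cases hm : p.1 = "00"
    · simp only [hm, if_pos]
      rw [← pv_inner_range '0' (PySem.Str.len p.2).toNat st]
      congr 1
    · simp only [if_neg hm]
      rw [← pv_inner_range '1' (PySem.Str.len p.2).toNat st]
      congr 1
  rw [hA, hB]
  set L := pvBits (pvPairs blocks) with hL
  rw [pv_chunksA L]
  rw [List.filter_eq_self.mpr (by
    intro c hc
    simpa using pv_chunks_ne_nil L c hc)]
  have := pv_stream_chunks L []
  simp only [List.nil_append] at this
  rw [show (if (L.foldl pvStep ([], 0, 0)).2.2 ≠ 0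
        then (L.foldl pvStep ([], 0, 0)).1 ++ [Char.ofNat (L.foldl pvStep ([], 0, 0)).2.1]
        else (L.foldl pvStep ([], 0, 0)).1) = pvFinal (L.foldl pvStep ([], 0, 0)) from rfl]
  rw [this]
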